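-- pv_equiv track=rewrite | github.com/Black-Zeus/MinuetAItor | APP/volumes/backend/app/services/pdf_job_builder.py | _map_participants_from_draft
-- ===== SOURCE A (Python) =====
-- from typing import Any, Dict, List
--
-- def _map_participants_from_draft(draft: Dict[str, Any]) -> Dict[str, Any]:
--     """
--     Draft format: participants[].type = "invited" | "attendee" | "copy"
--     Template expects: invited[], attendees[], copy_recipients[]
--     """
--     all_p = draft.get("participants", [])
--
--     def norm(p: Dict[str, Any]) -> Dict[str, Any]:
--         return {
--             "full_name": p.get("fullName", ""),
--             "initials":  p.get("initials", ""),
--             "role":      p.get("role", ""),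
--         }
--
--     return {
--         "invited":         [norm(p) for p in all_p if p.get("type") == "invited"],
--         "attendees":       [norm(p) for p in all_p if p.get("type") == "attendee"],
--         "copy_recipients": [norm(p) for p in all_p if p.get("type") == "copy"],
--     }
-- ===== SOURCE B (Python) =====
-- def _map_participants_from_draft(draft):
--     buckets = {"invited": [], "attendee": [], "copy": []}
--     for p in draft.get("participants", []):
--         bucket = buckets.get(p.get("type"))
--         if bucket is not None:
--             bucket.append({
--                 "full_name": p.get("fullName", ""),
--                 "initials":  p.get("initials", ""),
--                 "role":      p.get("role", ""),
--             })
--     return {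
--         "invited":         buckets["invited"],
--         "attendees":       buckets["attendee"],
--         "copy_recipients": buckets["copy"],
--     }
-- ===== Notes on version B (the rewrite author's own statement) =====
-- stated objective: alternative
-- what changed: Replaced the three filtered list comprehensions (three passes over participants) by a single table-driven pass that appends each normalized participant into a bucket dict keyed by its type string.
import Mathlib
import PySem

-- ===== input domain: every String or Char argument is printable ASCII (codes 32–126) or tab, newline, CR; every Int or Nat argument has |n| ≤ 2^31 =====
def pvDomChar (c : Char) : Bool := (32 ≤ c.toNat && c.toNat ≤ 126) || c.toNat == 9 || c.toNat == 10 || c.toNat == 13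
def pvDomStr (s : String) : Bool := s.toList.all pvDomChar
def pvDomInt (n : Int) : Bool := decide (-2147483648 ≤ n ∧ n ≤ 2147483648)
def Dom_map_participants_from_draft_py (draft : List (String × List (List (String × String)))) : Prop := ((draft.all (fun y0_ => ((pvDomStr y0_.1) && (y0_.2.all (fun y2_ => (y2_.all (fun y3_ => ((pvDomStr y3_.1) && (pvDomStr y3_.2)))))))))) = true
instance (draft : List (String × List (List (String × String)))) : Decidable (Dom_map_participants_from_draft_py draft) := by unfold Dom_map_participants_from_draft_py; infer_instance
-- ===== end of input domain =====

-- B replaces A's three filtered comprehensions (three passes over the participants)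
-- by one table-driven pass appending each participant into a bucket dict keyed by its
-- type string (objective: alternative decomposition, same cost class).

-- shared helper: first-match lookup in an association list (Python dict.get)
def pvGet {α : Type} (d : List (String × α)) (k : String) : Option α :=
  (d.find? (fun kv => kv.1 == k)).map (·.2)

def pvGetD {α : Type} (d : List (String × α)) (k : String) (dflt : α) : α :=
  (pvGet d k).getD dflt

-- shared helper `norm`: the normalized record (identical inner function in A and B)
def pvNorm (p : List (String × String)) : List (String × String) :=
  [("full_name", pvGetD p "fullName" ""),
   ("initials",  pvGetD p "initials" ""),
   ("role",      pvGetD p "role" "")]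

-- ===== PORT A =====
def map_participants_from_draft_py (draft : List (String × List (List (String × String)))) : List (String × List (List (String × String))) :=
  let all_p := pvGetD draft "participants" []
  [("invited",         (all_p.filter (fun p => pvGet p "type" == some "invited")).map pvNorm),
   ("attendees",       (all_p.filter (fun p => pvGet p "type" == some "attendee")).map pvNorm),
   ("copy_recipients", (all_p.filter (fun p => pvGet p "type" == some "copy")).map pvNorm)]

-- ===== PORT B =====
-- B's loop body: bucket = buckets.get(p.get("type")); if bucket is not None: bucket.append(norm(p))
def pvStep (d : PySem.Dict String (List (List (String × String)))) (p : List (String × String)) :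
    PySem.Dict String (List (List (String × String))) :=
  match pvGet p "type" with
  | some t => if d.contains t then d.modify t [] (· ++ [pvNorm p]) else d
  | none   => d

def map_participants_from_draft_py_alt (draft : List (String × List (List (String × String)))) : List (String × List (List (String × String))) :=
  let buckets0 : PySem.Dict String (List (List (String × String))) :=
    PySem.Dict.ofList [("invited", []), ("attendee", []), ("copy", [])]
  let buckets := (pvGetD draft "participants" []).foldl pvStep buckets0
  [("invited",         buckets.getD "invited" []),
   ("attendees",       buckets.getD "attendee" []),
   ("copy_recipients", buckets.getD "copy" [])]

-- ===== PRECONDITION & SPEC =====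
def Spec_map_participants_from_draft_py (draft : List (String × List (List (String × String)))) (out : List (String × List (List (String × String)))) : Prop := out = map_participants_from_draft_py_alt draft
instance (draft : List (String × List (List (String × String)))) (out : List (String × List (List (String × String)))) : Decidable (Spec_map_participants_from_draft_py draft out) := by unfold Spec_map_participants_from_draft_py; infer_instance

-- ===== CLAIM (what is proved, stated in full; the proofs are below) =====
def Claim_equal_map_participants_from_draft_py : Prop := ∀ (draft : List (String × List (List (String × String)))), Dom_map_participants_from_draft_py draft → Spec_map_participants_from_draft_py draft (map_participants_from_draft_py draft)

-- ===== LEMMAS AND PROOFS =====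

-- the bucket table as a literal Dict (its three keys are distinct)
theorem pvBuckets_mk (I A C : List (List (String × String))) :
    PySem.Dict.ofList [("invited", I), ("attendee", A), ("copy", C)] =
    PySem.Dict.mk [("invited", I), ("attendee", A), ("copy", C)] := by
  simp [PySem.Dict.ofList, PySem.Dict.update, PySem.Dict.insert, PySem.Dict.empty,
    PySem.Dict.contains]

-- invariant: B's bucket fold, started from any bucket contents, appends exactly
-- A's three filtered maps
theorem pvFold_eq (ps : List (List (String × String)))
    (I A C : List (List (String × String))) :
    ps.foldl pvStep (PySem.Dict.mk [("invited", I), ("attendee", A), ("copy", C)]) =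
    PySem.Dict.mk
      [("invited",  I ++ (ps.filter (fun p => pvGet p "type" == some "invited")).map pvNorm),
       ("attendee", A ++ (ps.filter (fun p => pvGet p "type" == some "attendee")).map pvNorm),
       ("copy",     C ++ (ps.filter (fun p => pvGet p "type" == some "copy")).map pvNorm)] := by
  induction ps generalizing I A C with
  | nil => simp
  | cons p ps ih =>
    simp only [List.foldl_cons, List.filter_cons]
    cases hty : pvGet p "type" with
    | none => simp [pvStep, hty, ih]
    | some t =>
      by_cases h1 : t = "invited"
      · subst h1
        simp [pvStep, hty, PySem.Dict.contains, PySem.Dict.modify, PySem.Dict.insert,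
          PySem.Dict.getD, PySem.Dict.get?, ih]
      · by_cases h2 : t = "attendee"
        · subst h2
          simp [pvStep, hty, PySem.Dict.contains, PySem.Dict.modify, PySem.Dict.insert,
            PySem.Dict.getD, PySem.Dict.get?, ih]
        · by_cases h3 : t = "copy"
          · subst h3
            simp [pvStep, hty, PySem.Dict.contains, PySem.Dict.modify, PySem.Dict.insert,
              PySem.Dict.getD, PySem.Dict.get?, ih]
          · simp [pvStep, hty, PySem.Dict.contains, Ne.symm h1, Ne.symm h2, Ne.symm h3,
              h1, h2, h3, ih]

-- ===== VERDICT (by name: the statement is the Claim_ definition above) =====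
theorem map_participants_from_draft_py_spec : Claim_equal_map_participants_from_draft_py := by
  intro draft _
  unfold Spec_map_participants_from_draft_py
  simp only [map_participants_from_draft_py, map_participants_from_draft_py_alt,
    pvBuckets_mk, pvFold_eq]
  simp [PySem.Dict.getD, PySem.Dict.get?]
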